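-- pv_equiv track=rewrite | github.com/NEU-SNS/ReverseTraceroutePublic | rankingservice/atlas/record_route.py | compute_pred_succ_constraints
-- ===== SOURCE A (Python) =====
-- def flatten_connected(successors_per_hop):
--     for hop in successors_per_hop:
--         successors = successors_per_hop[hop]
--         prev_successors = set()
--         while len(successors) != len(prev_successors):
--             prev_successors = set(successors)
--             new_successors = set(successors)
--             for successor in successors:
--                 if successor in successors_per_hop:
--                     new_successors.update(successors_per_hop[successor])
--             successors = new_successors
--         successors_per_hop[hop] = successors
--
-- def compute_pred_succ_constraints(tr_hop_ping_id_rr_hops):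
--     '''
--     Ugly implementation to find successors and predecessors of hops in RR
--     :param tr_hop_ping_id_rr_hops:
--     :return:
--     '''
--     predecessors_per_hop = {}
--     successors_per_hop = {}
--     for tr_hop, ping_id_rr_hops in tr_hop_ping_id_rr_hops.items():
--         for _, rr_hops in ping_id_rr_hops.items():
--             rr_hops = sorted(rr_hops, key=lambda x: x[1])
--             for i in range(len(rr_hops)):
--                 rr_hop_i, _ = rr_hops[i]
--                 for j in range(i+1, len(rr_hops)):
--                     rr_hop_j, _ = rr_hops[j]
--                     predecessors_per_hop.setdefault(rr_hop_j, set()).add(rr_hop_i)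
--                     successors_per_hop.setdefault(rr_hop_i, set()).add(rr_hop_j)
--
--     # Flatten the predecessors so that every hop has the full set of predecessors/successors.
--     flatten_connected(successors_per_hop)
--     flatten_connected(predecessors_per_hop)
--
--     return predecessors_per_hop, successors_per_hop
-- ===== SOURCE B (Python) =====
-- def compute_pred_succ_constraints(tr_hop_ping_id_rr_hops):
--     '''
--     Build ordering edges per RR measurement with prefix/suffix slices (one pass per
--     hop instead of a nested index pair loop), then flatten each hop's set with a
--     single-pass worklist search that memoizes already-flattened hops, instead of
--     re-scanning the whole set until a fixpoint.
--     '''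
--     predecessors_per_hop = {}
--     successors_per_hop = {}
--     for ping_id_rr_hops in tr_hop_ping_id_rr_hops.values():
--         for rr_hops in ping_id_rr_hops.values():
--             hops = [h for h, _ in sorted(rr_hops, key=lambda x: x[1])]
--             for i, h in enumerate(hops):
--                 rest = hops[i + 1:]
--                 if rest:
--                     successors_per_hop.setdefault(h, set()).update(rest)
--                 for nxt in rest:
--                     predecessors_per_hop.setdefault(nxt, set()).add(h)
--     for m in (successors_per_hop, predecessors_per_hop):
--         for hop in m:
--             frontier = list(m[hop])
--             seen = set(frontier)
--             k = 0
--             while k < len(frontier):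
--                 for nxt in m.get(frontier[k], ()):
--                     if nxt not in seen:
--                         seen.add(nxt)
--                         frontier.append(nxt)
--                 k += 1
--             m[hop] = seen
--     return predecessors_per_hop, successors_per_hop
-- ===== Notes on version B (the rewrite author's own statement) =====
-- stated objective: alternative
-- what changed: B builds the ordering edges with one enumerate/slice pass per measurement (bulk suffix update instead of the nested index-pair loop) and flattens each hop with a single-pass worklist search over a seen-set that memoizes already-flattened hops, instead of A's repeated whole-set rescans until a length fixpoint.
import Mathlib
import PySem

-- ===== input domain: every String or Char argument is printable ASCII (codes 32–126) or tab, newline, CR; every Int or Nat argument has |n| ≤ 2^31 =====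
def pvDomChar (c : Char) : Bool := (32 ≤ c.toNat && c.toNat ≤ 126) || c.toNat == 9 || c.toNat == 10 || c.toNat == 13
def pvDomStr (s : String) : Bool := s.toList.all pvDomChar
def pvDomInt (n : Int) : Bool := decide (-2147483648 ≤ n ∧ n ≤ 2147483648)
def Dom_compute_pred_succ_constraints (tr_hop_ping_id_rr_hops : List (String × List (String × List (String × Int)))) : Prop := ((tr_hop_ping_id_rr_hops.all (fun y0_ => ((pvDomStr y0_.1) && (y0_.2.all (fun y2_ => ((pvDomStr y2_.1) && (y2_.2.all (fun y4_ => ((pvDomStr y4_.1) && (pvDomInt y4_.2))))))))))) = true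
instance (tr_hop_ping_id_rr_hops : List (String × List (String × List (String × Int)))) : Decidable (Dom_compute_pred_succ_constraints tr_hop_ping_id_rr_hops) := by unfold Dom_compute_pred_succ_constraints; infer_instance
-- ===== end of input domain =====

-- B replaces A's nested index-pair edge loops by per-hop prefix/suffix updates and A's
-- repeated whole-set fixpoint flattening by a single-pass worklist search (alternative
-- decomposition; the closure pass does each element once instead of once per round).

abbrev pvD : Type := PySem.Dict String (PySem.Set String)

-- ===== PORT A =====

-- predecessors_per_hop.setdefault(k, set()).add(v)
def pvAddEdge (d : pvD) (k v : String) : pvD :=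
  d.modify k [] (fun s => PySem.Set.add s v)

-- body of A's per-measurement nested index loops
def pvEdgesA (acc : pvD × pvD) (rr : List (String × Int)) : pvD × pvD :=
  let rrs := PySem.List.sorted rr (fun x => x.2)
  (PySem.List.pyRange 0 (rrs.length : Int)).foldl (fun acc i =>
    let hi := (PySem.List.pyGetD rrs i ("", 0)).1
    (PySem.List.pyRange (i + 1) (rrs.length : Int)).foldl (fun acc j =>
      let hj := (PySem.List.pyGetD rrs j ("", 0)).1
      (pvAddEdge acc.1 hj hi, pvAddEdge acc.2 hi hj)) acc) acc

-- one round of flatten_connected's inner for loop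
def pvScan (m : pvD) (c : PySem.Set String) : PySem.Set String :=
  c.foldl (fun acc s => if m.contains s then PySem.Set.update acc (m.getD s []) else acc) c

-- the 'while len(successors) != len(prev_successors)' loop; fuel is a totality guard only
def pvFlattenGo (m : pvD) : Nat → Nat → PySem.Set String → PySem.Set String
  | 0, _, c => c
  | fuel + 1, p, c => if c.length = p then c else pvFlattenGo m fuel c.length (pvScan m c)

def pvFuelA (m : pvD) (c : PySem.Set String) : Nat :=
  (PySem.Set.ofList (c ++ m.values.flatten)).length + 2

-- flatten_connected
def pvFlatten (m : pvD) : pvD :=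
  m.keys.foldl (fun m hop =>
    let c := m.getD hop []
    m.insert hop (pvFlattenGo m (pvFuelA m c) 0 c)) m

def compute_pred_succ_constraints (tr_hop_ping_id_rr_hops : List (String × List (String × List (String × Int)))) : (List (String × List String)) × (List (String × List String)) :=
  let acc := tr_hop_ping_id_rr_hops.foldl (fun acc kv =>
    kv.2.foldl (fun acc kv2 => pvEdgesA acc kv2.2) acc) (PySem.Dict.empty, PySem.Dict.empty)
  let sd := pvFlatten acc.2
  let pd := pvFlatten acc.1
  (pd.items, sd.items)

-- ===== PORT B =====

-- predecessors_per_hop.setdefault(nxt, set()).add(h)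
def pvAltAdd (d : pvD) (k v : String) : pvD :=
  d.modify k [] (fun s => PySem.Set.add s v)

-- successors_per_hop.setdefault(h, set()).update(rest)
def pvAltExtend (d : pvD) (k : String) (vs : List String) : pvD :=
  d.modify k [] (fun s => PySem.Set.update s vs)

-- body of B's per-measurement enumerate/slice loop
def pvEdgesB (acc : pvD × pvD) (rr : List (String × Int)) : pvD × pvD :=
  let hops := (PySem.List.sorted rr (fun x => x.2)).map (fun x => x.1)
  (PySem.List.enumerate hops).foldl (fun acc ih =>
    let rest := PySem.List.slice hops (some (ih.1 + 1)) none
    let sd := if rest = [] then acc.2 else pvAltExtend acc.2 ih.2 rest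
    let pd := rest.foldl (fun pd nxt => pvAltAdd pd nxt ih.2) acc.1
    (pd, sd)) acc

-- 'for nxt in m.get(frontier[k], ()): if nxt not in seen: ...'
def pvBStep (m : pvD) (fs : List String × PySem.Set String) (x : String) : List String × PySem.Set String :=
  (m.getD x []).foldl (fun fs nxt =>
    if PySem.Set.contains fs.2 nxt then fs else (fs.1 ++ [nxt], PySem.Set.add fs.2 nxt)) fs

-- the 'while k < len(frontier)' worklist; fuel is a totality guard only
def pvBGo (m : pvD) : Nat → List String → PySem.Set String → Nat → List String × PySem.Set String
  | 0, fr, seen, _ => (fr, seen)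
  | fuel + 1, fr, seen, k =>
      if k < fr.length then
        let fs := pvBStep m (fr, seen) (fr.getD k "")
        pvBGo m fuel fs.1 fs.2 (k + 1)
      else (fr, seen)

def pvFuelB (m : pvD) (fr : List String) : Nat := fr.length + m.values.flatten.length + 1

def pvBFlatten (m : pvD) : pvD :=
  m.keys.foldl (fun m hop =>
    let fr := m.getD hop []
    let seen := PySem.Set.ofList fr
    m.insert hop (pvBGo m (pvFuelB m fr) fr seen 0).2) m

def compute_pred_succ_constraints_alt (tr_hop_ping_id_rr_hops : List (String × List (String × List (String × Int)))) : (List (String × List String)) × (List (String × List String)) :=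
  let acc := tr_hop_ping_id_rr_hops.foldl (fun acc kv =>
    kv.2.foldl (fun acc kv2 => pvEdgesB acc kv2.2) acc) (PySem.Dict.empty, PySem.Dict.empty)
  let sd := pvBFlatten acc.2
  let pd := pvBFlatten acc.1
  (pd.items, sd.items)

-- ===== PRECONDITION & SPEC =====
-- Pre_ excludes association lists with duplicate keys in the outer or inner dict: a Python
-- dict cannot hold duplicate keys (later entries silently overwrite earlier ones), so such
-- lists do not denote any input the Python function is ever given.
def Pre_compute_pred_succ_constraints (tr_hop_ping_id_rr_hops : List (String × List (String × List (String × Int)))) : Prop :=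
  (tr_hop_ping_id_rr_hops.map Prod.fst).Nodup ∧
  ∀ p ∈ tr_hop_ping_id_rr_hops, (p.2.map Prod.fst).Nodup
instance (tr_hop_ping_id_rr_hops : List (String × List (String × List (String × Int)))) : Decidable (Pre_compute_pred_succ_constraints tr_hop_ping_id_rr_hops) := by unfold Pre_compute_pred_succ_constraints; infer_instance

def pvWitness_compute_pred_succ_constraints : (List (String × List (String × List (String × Int)))) :=
  [("t1", [("p1", [("a", 1), ("b", 2), ("c", 3)]), ("p2", [("c", 1), ("d", 2)])]),
   ("t2", [("p3", [("b", 5), ("a", 4)])])]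

def Spec_compute_pred_succ_constraints (tr_hop_ping_id_rr_hops : List (String × List (String × List (String × Int)))) (out : (List (String × List String)) × (List (String × List String))) : Prop := out = compute_pred_succ_constraints_alt tr_hop_ping_id_rr_hops
instance (tr_hop_ping_id_rr_hops : List (String × List (String × List (String × Int)))) (out : (List (String × List String)) × (List (String × List String))) : Decidable (Spec_compute_pred_succ_constraints tr_hop_ping_id_rr_hops out) := by unfold Spec_compute_pred_succ_constraints; infer_instance

-- ===== CLAIM (what is proved, stated in full; the proofs are below) =====
def Claim_equal_compute_pred_succ_constraints : Prop := ∀ (tr_hop_ping_id_rr_hops : List (String × List (String × List (String × Int)))), Dom_compute_pred_succ_constraints tr_hop_ping_id_rr_hops → Pre_compute_pred_succ_constraints tr_hop_ping_id_rr_hops → Spec_compute_pred_succ_constraints tr_hop_ping_id_rr_hops (compute_pred_succ_constraints tr_hop_ping_id_rr_hops)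

-- ===== LEMMAS AND PROOFS =====

-- common spec of both per-measurement edge loops, structural on the sorted hop list
def pvEdgeGo : pvD × pvD → List String → pvD × pvD
  | acc, [] => acc
  | acc, h :: rest =>
    pvEdgeGo (rest.foldl (fun pd nxt => pvAddEdge pd nxt h) acc.1,
              if rest = [] then acc.2 else acc.2.modify h [] (fun s => PySem.Set.update s rest)) rest

lemma pvAltAdd_eq : pvAltAdd = pvAddEdge := rfl

-- a chain of setdefault(k).add(v) at one key is one setdefault(k).update(vs)
lemma foldl_addEdge_fixed_key (vs : List String) (d : pvD) (k : String) :
    vs.foldl (fun d v => pvAddEdge d k v) d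
      = if vs = [] then d else d.modify k [] (fun s => PySem.Set.update s vs) := by
  induction vs generalizing d with
  | nil => rfl
  | cons v vs ih =>
    simp only [List.foldl_cons, ih]
    by_cases h : vs = []
    · subst h
      rw [if_neg (List.cons_ne_nil v [])]
      rfl
    · rw [if_neg h, if_neg (List.cons_ne_nil v vs)]
      show (pvAddEdge d k v).modify k [] _ = _
      unfold pvAddEdge PySem.Dict.modify
      rw [PySem.Dict.getD_insert_self, PySem.Dict.insert_insert_self]
      rfl

lemma pvEdgesA_range(rrs : List (String × Int)) :
    ∀ (d a : Nat), rrs.length - a = d → a ≤ rrs.length → ∀ acc : pvD × pvD,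
    (PySem.List.pyRange (a : Int) (rrs.length : Int)).foldl
      (fun acc i =>
        (PySem.List.pyRange (i + 1) (rrs.length : Int)).foldl
          (fun acc j =>
            (pvAddEdge acc.1 (PySem.List.pyGetD rrs j ("", 0)).1 (PySem.List.pyGetD rrs i ("", 0)).1,
             pvAddEdge acc.2 (PySem.List.pyGetD rrs i ("", 0)).1 (PySem.List.pyGetD rrs j ("", 0)).1)) acc) acc
    = pvEdgeGo acc ((rrs.drop a).map (fun y => y.1)) := by
  intro d
  induction d with
  | zero =>
    intro a hd ha acc
    have haa : a = rrs.length := by omega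
    have h1 : PySem.List.pyRange (a : Int) (rrs.length : Int) = [] := by
      simp [PySem.List.pyRange, haa]
    rw [h1, List.drop_of_length_le (by omega)]
    rfl
  | succ d ih =>
    intro a hd ha acc
    have halt : a < rrs.length := by omega
    obtain ⟨pd, sd⟩ := acc
    have hcast : ((a : Int) + 1) = ((a + 1 : Nat) : Int) := by push_cast; ring
    have hlen : ((rrs.length : Nat) : Int) = PySem.List.len rrs := rfl
    rw [PySem.List.pyRange_one_cons (by exact_mod_cast halt), List.foldl_cons]
    rw [PySem.List.foldl_prod_mk
          (f := fun pd j => pvAddEdge pd (PySem.List.pyGetD rrs j ("", 0)).1 (PySem.List.pyGetD rrs (a:Int) ("", 0)).1)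
          (g := fun sd j => pvAddEdge sd (PySem.List.pyGetD rrs (a:Int) ("", 0)).1 (PySem.List.pyGetD rrs j ("", 0)).1)]
    rw [hcast, hlen]
    rw [PySem.List.foldl_pyRange_pyGetD rrs ("", 0)
          (fun pd y => pvAddEdge pd y.1 (PySem.List.pyGetD rrs (a:Int) ("", 0)).1) pd (Int.natCast_nonneg _)]
    rw [PySem.List.foldl_pyRange_pyGetD rrs ("", 0)
          (fun sd y => pvAddEdge sd (PySem.List.pyGetD rrs (a:Int) ("", 0)).1 y.1) sd (Int.natCast_nonneg _)]
    rw [Int.toNat_natCast]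
    generalize hc : (PySem.List.pyGetD rrs (a : Int) ("", 0)).1 = hi
    rw [← List.foldl_map (f := fun y : String × Int => y.1) (g := fun pd nxt => pvAddEdge pd nxt hi)]
    rw [← List.foldl_map (f := fun y : String × Int => y.1) (g := fun sd nxt => pvAddEdge sd hi nxt)]
    rw [foldl_addEdge_fixed_key _ sd hi]
    rw [← hlen]
    rw [ih (a + 1) (by omega) (by omega)]
    have hdrop : rrs.drop a = rrs[a] :: rrs.drop (a + 1) := List.drop_eq_getElem_cons halt
    have hhi : rrs[a].1 = hi := by
      rw [← hc, PySem.List.pyGetD_natCast, List.getD_eq_getElem _ _ halt]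
    rw [hdrop, List.map_cons, hhi]
    conv_rhs => rw [pvEdgeGo]

lemma pvEnumerate_cons (x : String) (t : List String) (n : Int) :
    PySem.List.enumerate (x :: t) n = (n, x) :: PySem.List.enumerate t (n + 1) := rfl

lemma pvEdgesA_eq_go (acc : pvD × pvD) (rr : List (String × Int)) :
    pvEdgesA acc rr
      = pvEdgeGo acc ((PySem.List.sorted rr (fun x => x.2)).map (fun y => y.1)) := by
  show (PySem.List.pyRange ((0:Nat) : Int) _).foldl _ acc = _
  rw [pvEdgesA_range (PySem.List.sorted rr (fun x => x.2)) _ 0 rfl (Nat.zero_le _) acc]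
  rfl

lemma pvEdgesB_enum (hops : List String) :
    ∀ (t : List String) (a : Nat), hops.drop a = t → ∀ acc : pvD × pvD,
    (PySem.List.enumerate t (a : Int)).foldl
      (fun acc ih =>
        (PySem.List.slice hops (some (ih.1 + 1)) none |>.foldl (fun pd nxt => pvAltAdd pd nxt ih.2) acc.1,
         if PySem.List.slice hops (some (ih.1 + 1)) none = [] then acc.2
         else pvAltExtend acc.2 ih.2 (PySem.List.slice hops (some (ih.1 + 1)) none))) acc
    = pvEdgeGo acc t := by
  intro t
  induction t with
  | nil => intro a _ acc; rfl
  | cons h t ihh =>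
    intro a hdrop acc
    rw [pvEnumerate_cons, List.foldl_cons]
    have htail : hops.drop (a + 1) = t := by
      have h2 : hops.drop (a + 1) = (hops.drop a).tail := List.tail_drop.symm
      rw [h2, hdrop]
      rfl
    have hslice : PySem.List.slice hops (some ((a : Int) + 1)) none = t := by
      rw [PySem.List.slice_from hops (by omega)]
      rw [show ((a : Int) + 1).toNat = a + 1 by omega, htail]
    rw [hslice]
    have hcast : ((a : Int) + 1) = ((a + 1 : Nat) : Int) := by push_cast; ring
    rw [hcast]
    rw [ihh (a + 1) htail _]
    rw [pvAltAdd_eq]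
    conv_rhs => rw [pvEdgeGo]
    rfl

lemma pvEdgesB_eq_go (acc : pvD × pvD) (rr : List (String × Int)) :
    pvEdgesB acc rr
      = pvEdgeGo acc ((PySem.List.sorted rr (fun x => x.2)).map (fun y => y.1)) := by
  have h := pvEdgesB_enum ((PySem.List.sorted rr (fun x => x.2)).map (fun x => x.1))
    ((PySem.List.sorted rr (fun x => x.2)).map (fun x => x.1)) 0 List.drop_zero acc
  rw [Nat.cast_zero] at h
  unfold pvEdgesB
  simp only []
  exact h

lemma pvEdgesA_eq_pvEdgesB : pvEdgesA = pvEdgesB := by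
  funext acc rr
  rw [pvEdgesA_eq_go, pvEdgesB_eq_go]

-- ===== Part 2: closure =====

-- proof-side single-list worklist (B's worklist with seen merged into the frontier)
def pvW (m : pvD) : Nat → List String → Nat → List String
  | 0, fr, _ => fr
  | f + 1, fr, k =>
      if k < fr.length then pvW m f (PySem.Set.update fr (m.getD (fr.getD k "") [])) (k + 1) else fr

lemma pvUpdate_of_subset (s : PySem.Set String) (xs : List String) (h : ∀ x ∈ xs, x ∈ s) :
    PySem.Set.update s xs = s := by
  rw [PySem.Set.update_eq_append_filter]
  have : (PySem.Set.ofList xs).filter (fun y => !s.contains y) = [] := by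
    rw [List.filter_eq_nil_iff]
    intro a ha
    have : a ∈ s := h a ((PySem.Set.mem_ofList _ _).1 ha)
    simp [this]
  rw [this, List.append_nil]

lemma pvGetD_mem_values_or_nil (m : pvD) (x : String) :
    m.getD x [] ∈ m.values ∨ m.getD x [] = ([] : List String) := by
  cases h : m.get? x with
  | none => right; rw [PySem.Dict.getD_eq_get?_getD, h]; rfl
  | some v =>
    left
    rw [PySem.Dict.getD_eq_get?_getD, h]
    have := PySem.Dict.mem_items_of_get?_eq_some m h
    have : v ∈ m.values := by
      simp only [PySem.Dict.values]
      exact List.mem_map.2 ⟨(x, v), this, rfl⟩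
    exact this

lemma pvFoldStep_diag :
    ∀ (vs : List String) (fr : PySem.Set String),
    vs.foldl (fun fs nxt =>
        if PySem.Set.contains fs.2 nxt then fs else (fs.1 ++ [nxt], PySem.Set.add fs.2 nxt)) (fr, fr)
      = (PySem.Set.update fr vs, PySem.Set.update fr vs) := by
  intro vs
  induction vs with
  | nil => intro fr; simp [PySem.Set.update_nil]
  | cons v vs ih =>
    intro fr
    rw [List.foldl_cons, PySem.Set.update_cons]
    by_cases h : v ∈ fr
    · rw [if_pos (by simpa [PySem.Set.contains_iff] using h)]
      rw [PySem.Set.add_of_mem h] at *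
      exact ih fr
    · rw [if_neg (by simpa [PySem.Set.contains_iff] using h)]
      have : fr ++ [v] = PySem.Set.add fr v := (PySem.Set.add_of_not_mem h).symm
      rw [this]
      exact ih _

lemma pvBStep_diag (m : pvD) (fr : PySem.Set String) (x : String) :
    pvBStep m (fr, fr) x
      = (PySem.Set.update fr (m.getD x []), PySem.Set.update fr (m.getD x [])) := by
  unfold pvBStep
  exact pvFoldStep_diag _ fr

lemma pvBGo_diag (m : pvD) : ∀ (f : Nat) (fr : PySem.Set String) (k : Nat),
    pvBGo m f fr fr k = (pvW m f fr k, pvW m f fr k) := by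
  intro f
  induction f with
  | zero => intro fr k; rfl
  | succ f ih =>
    intro fr k
    show (if k < fr.length then _ else _) = _
    unfold pvW
    by_cases h : k < fr.length
    · rw [if_pos h, if_pos h]
      simp only [pvBStep_diag]
      exact ih _ _
    · rw [if_neg h, if_neg h]

lemma pvLength_le_of_nodup_subset (c allowed : List String) (h1 : c.Nodup)
    (h2 : ∀ x ∈ c, x ∈ allowed) : c.length ≤ allowed.length := by
  classical
  calc c.length = c.toFinset.card := (List.toFinset_card_of_nodup h1).symm
    _ ≤ allowed.toFinset.card := Finset.card_le_card (by
        intro x hx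
        rw [List.mem_toFinset] at *
        exact h2 x hx)
    _ ≤ allowed.length := List.toFinset_card_le _

lemma pvW_succ (m : pvD) (allowed : List String)
    (hv : ∀ v ∈ m.values, ∀ x ∈ v, x ∈ allowed) :
    ∀ (f : Nat) (c : List String) (k : Nat), c.Nodup → (∀ x ∈ c, x ∈ allowed) →
      allowed.length ≤ f + k → pvW m (f + 1) c k = pvW m f c k := by
  intro f
  induction f with
  | zero =>
    intro c k h1 h2 hf
    have : ¬ k < c.length := by
      have := pvLength_le_of_nodup_subset c allowed h1 h2
      omega
    unfold pvW
    rw [if_neg this]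
  | succ f ih =>
    intro c k h1 h2 hf
    show (if k < c.length then _ else _) = (if k < c.length then _ else _)
    by_cases h : k < c.length
    · rw [if_pos h, if_pos h]
      have hx : c.getD k "" ∈ c := by
        rw [List.getD_eq_getElem _ _ h]
        exact List.getElem_mem h
      have hsub : ∀ x ∈ m.getD (c.getD k "") [], x ∈ allowed := by
        rcases pvGetD_mem_values_or_nil m (c.getD k "") with hm | hm
        · exact hv _ hm
        · rw [hm]; intro x hx; cases hx
      exact ih _ (k + 1) (PySem.Set.nodup_update _ _ h1)
        (by
          intro x hx
          rcases (PySem.Set.mem_update _ _ _).1 hx with hx | hx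
          · exact h2 x hx
          · exact hsub x hx)
        (by omega)
    · rw [if_neg h, if_neg h]

lemma pvW_fuel_le (m : pvD) (allowed : List String)
    (hv : ∀ v ∈ m.values, ∀ x ∈ v, x ∈ allowed) :
    ∀ (d f : Nat) (c : List String) (k : Nat), c.Nodup → (∀ x ∈ c, x ∈ allowed) →
      allowed.length ≤ f + k → pvW m (f + d) c k = pvW m f c k := by
  intro d
  induction d with
  | zero => intro f c k _ _ _; rfl
  | succ d ih =>
    intro f c k h1 h2 hf
    have : f + (d + 1) = (f + d) + 1 := by omega
    rw [this, pvW_succ m allowed hv (f + d) c k h1 h2 (by omega), ih f c k h1 h2 hf]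

lemma pvW_fuel_eq (m : pvD) (allowed : List String)
    (hv : ∀ v ∈ m.values, ∀ x ∈ v, x ∈ allowed)
    (f g : Nat) (c : List String) (k : Nat) (h1 : c.Nodup) (h2 : ∀ x ∈ c, x ∈ allowed)
    (hf : allowed.length ≤ f + k) (hg : allowed.length ≤ g + k) :
    pvW m f c k = pvW m g c k := by
  rcases le_total f g with h | h
  · obtain ⟨d, rfl⟩ := Nat.le.dest h
    exact (pvW_fuel_le m allowed hv d f c k h1 h2 hf).symm
  · obtain ⟨d, rfl⟩ := Nat.le.dest h
    exact pvW_fuel_le m allowed hv d g c k h1 h2 hg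

-- canonical-fuel worklist
def pvWC (m : pvD) (allowed : List String) (c : List String) (k : Nat) : List String :=
  pvW m (allowed.length + 1) c k

lemma pvWC_step (m : pvD) (allowed : List String)
    (hv : ∀ v ∈ m.values, ∀ x ∈ v, x ∈ allowed)
    (c : List String) (k : Nat) (h1 : c.Nodup) (h2 : ∀ x ∈ c, x ∈ allowed)
    (h : k < c.length) :
    pvWC m allowed c k
      = pvWC m allowed (PySem.Set.update c (m.getD (c.getD k "") [])) (k + 1) := by
  have hsub : ∀ x ∈ m.getD (c.getD k "") [], x ∈ allowed := by
    rcases pvGetD_mem_values_or_nil m (c.getD k "") with hm | hm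
    · exact hv _ hm
    · rw [hm]; intro x hx; cases hx
  have h1' : (PySem.Set.update c (m.getD (c.getD k "") [])).Nodup :=
    PySem.Set.nodup_update _ _ h1
  have h2' : ∀ x ∈ PySem.Set.update c (m.getD (c.getD k "") []), x ∈ allowed := by
    intro x hx
    rcases (PySem.Set.mem_update _ _ _).1 hx with hx | hx
    · exact h2 x hx
    · exact hsub x hx
  show (if k < c.length then _ else _) = _
  rw [if_pos h]
  exact pvW_fuel_eq m allowed hv _ _ _ _ h1' h2' (by omega) (by omega)

lemma pvW_sat (m : pvD) (c : List String)
    (hsat : ∀ x ∈ c, ∀ y ∈ m.getD x [], y ∈ c) :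
    ∀ (f k : Nat), pvW m f c k = c := by
  intro f
  induction f with
  | zero => intro k; rfl
  | succ f ih =>
    intro k
    show (if k < c.length then _ else _) = c
    by_cases h : k < c.length
    · rw [if_pos h]
      have hx : c.getD k "" ∈ c := by
        rw [List.getD_eq_getElem _ _ h]
        exact List.getElem_mem h
      rw [pvUpdate_of_subset c _ (hsat _ hx)]
      exact ih (k + 1)
    · rw [if_neg h]

-- scan-step normalisation: the contains-guard is absorbed by getD/update
lemma pvScan_eq_foldupd (m : pvD) (c : PySem.Set String) :
    pvScan m c = c.foldl (fun acc s => PySem.Set.update acc (m.getD s [])) c := by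
  unfold pvScan
  apply PySem.List.foldl_congr_mem
  intro acc x hx
  by_cases h : m.contains x
  · rw [if_pos h]
  · rw [if_neg h, PySem.Dict.getD_of_not_contains m [] (by simpa using h),
        PySem.Set.update_nil]

lemma pvFoldUpd_prefix (m : pvD) :
    ∀ (l : List String) (acc : PySem.Set String),
      acc <+: l.foldl (fun acc s => PySem.Set.update acc (m.getD s [])) acc := by
  intro l
  induction l with
  | nil => intro acc; exact List.prefix_refl _
  | cons x l ih =>
    intro acc
    rw [List.foldl_cons]
    refine List.IsPrefix.trans ?_ (ih _)
    rw [PySem.Set.update_eq_append_filter]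
    exact List.prefix_append _ _

lemma pvFoldUpd_sat (m : pvD) :
    ∀ (l : List String) (acc : PySem.Set String), ∀ x ∈ l, ∀ y ∈ m.getD x [],
      y ∈ l.foldl (fun acc s => PySem.Set.update acc (m.getD s [])) acc := by
  intro l
  induction l with
  | nil => intro acc x hx; cases hx
  | cons z l ih =>
    intro acc x hx y hy
    rw [List.foldl_cons]
    rcases List.mem_cons.1 hx with hx | hx
    · subst hx
      have hy1 : y ∈ PySem.Set.update acc (m.getD x []) :=
        (PySem.Set.mem_update _ _ _).2 (Or.inr hy)
      exact (pvFoldUpd_prefix m l _).subset hy1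
    · exact ih _ x hx y hy

lemma pvFoldUpd_inv (m : pvD) (allowed : List String)
    (hv : ∀ v ∈ m.values, ∀ x ∈ v, x ∈ allowed) :
    ∀ (l : List String) (acc : PySem.Set String), acc.Nodup → (∀ x ∈ acc, x ∈ allowed) →
      (l.foldl (fun acc s => PySem.Set.update acc (m.getD s [])) acc).Nodup ∧
      (∀ x ∈ l.foldl (fun acc s => PySem.Set.update acc (m.getD s [])) acc, x ∈ allowed) := by
  intro l
  induction l with
  | nil => intro acc h1 h2; exact ⟨h1, h2⟩
  | cons z l ih =>
    intro acc h1 h2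
    rw [List.foldl_cons]
    refine ih _ (PySem.Set.nodup_update _ _ h1) ?_
    intro x hx
    rcases (PySem.Set.mem_update _ _ _).1 hx with hx | hx
    · exact h2 x hx
    · rcases pvGetD_mem_values_or_nil m z with hm | hm
      · exact hv _ hm x hx
      · rw [hm] at hx; cases hx

-- running the worklist across positions j..|c|-1 performs exactly one scan round over c
lemma pvWC_scanSeg (m : pvD) (allowed : List String)
    (hv : ∀ v ∈ m.values, ∀ x ∈ v, x ∈ allowed) (c : List String) :
    ∀ (d j : Nat), c.length - j = d → j ≤ c.length →
    ∀ acc : List String, c <+: acc → acc.Nodup → (∀ x ∈ acc, x ∈ allowed) →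
      pvWC m allowed acc j
        = pvWC m allowed
            ((c.drop j).foldl (fun acc s => PySem.Set.update acc (m.getD s [])) acc) c.length := by
  intro d
  induction d with
  | zero =>
    intro j hd hj acc hpre h1 h2
    have hj' : j = c.length := by omega
    subst hj'
    rw [List.drop_of_length_le (le_refl _)]
    rfl
  | succ d ih =>
    intro j hd hj acc hpre h1 h2
    have hjlt : j < c.length := by omega
    have hjacc : j < acc.length := by
      have := hpre.length_le
      omega
    obtain ⟨t, rfl⟩ := hpre
    have hget : (c ++ t).getD j "" = c.getD j "" := List.getD_append c t "" j hjlt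
    rw [pvWC_step m allowed hv _ j h1 h2 hjacc, hget]
    have hdrop : c.drop j = c.getD j "" :: c.drop (j + 1) := by
      rw [List.getD_eq_getElem _ _ hjlt]
      exact List.drop_eq_getElem_cons hjlt
    rw [hdrop, List.foldl_cons]
    have hpre' : c <+: PySem.Set.update (c ++ t) (m.getD (c.getD j "") []) := by
      have hA : c <+: c ++ t := List.prefix_append c t
      have hB : (c ++ t) <+: PySem.Set.update (c ++ t) (m.getD (c.getD j "") []) := by
        rw [PySem.Set.update_eq_append_filter]
        exact List.prefix_append _ _
      exact hA.trans hB
    have h1' : (PySem.Set.update (c ++ t) (m.getD (c.getD j "") [])).Nodup :=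
      PySem.Set.nodup_update _ _ h1
    have h2' : ∀ x ∈ PySem.Set.update (c ++ t) (m.getD (c.getD j "") []), x ∈ allowed := by
      intro x hx
      rcases (PySem.Set.mem_update _ _ _).1 hx with hx | hx
      · exact h2 x hx
      · rcases pvGetD_mem_values_or_nil m (c.getD j "") with hm | hm
        · exact hv _ hm x hx
        · rw [hm] at hx; cases hx
    exact ih (j + 1) (by omega) (by omega) _ hpre' h1' h2'

-- positions whose successor sets are already contained add nothing
lemma pvWC_noop_seg (m : pvD) (allowed c1 : List String)
    (hv : ∀ v ∈ m.values, ∀ x ∈ v, x ∈ allowed)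
    (h1 : c1.Nodup) (h2 : ∀ x ∈ c1, x ∈ allowed) :
    ∀ (d j n : Nat), n - j = d → j ≤ n → n ≤ c1.length →
      (∀ k, k < n → ∀ y ∈ m.getD (c1.getD k "") [], y ∈ c1) →
      pvWC m allowed c1 j = pvWC m allowed c1 n := by
  intro d
  induction d with
  | zero =>
    intro j n hd _ _ _
    have : j = n := by omega
    rw [this]
  | succ d ih =>
    intro j n hd hj hn hs
    have hjn : j < n := by omega
    rw [pvWC_step m allowed hv c1 j h1 h2 (by omega)]
    rw [pvUpdate_of_subset c1 _ (hs j (by omega))]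
    exact ih (j + 1) n (by omega) (by omega) hn hs

-- MAIN: A's round-based fixpoint equals the canonical worklist
lemma pvFlattenGo_eq_pvWC (m : pvD) (allowed : List String)
    (hv : ∀ v ∈ m.values, ∀ x ∈ v, x ∈ allowed) :
    ∀ (fA p : Nat) (c : List String), c.Nodup → (∀ x ∈ c, x ∈ allowed) →
      p ≠ c.length → allowed.length + 2 ≤ fA + c.length →
      pvFlattenGo m fA p c = pvWC m allowed c 0 := by
  intro fA
  induction fA with
  | zero =>
    intro p c h1 h2 hp hf
    have := pvLength_le_of_nodup_subset c allowed h1 h2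
    omega
  | succ fA ih =>
    intro p c h1 h2 hp hf
    have hle := pvLength_le_of_nodup_subset c allowed h1 h2
    show (if c.length = p then c else pvFlattenGo m fA c.length (pvScan m c)) = _
    rw [if_neg (fun h => hp h.symm)]
    rw [pvScan_eq_foldupd]
    set c1 := c.foldl (fun acc s => PySem.Set.update acc (m.getD s [])) c with hc1
    have hpre : c <+: c1 := pvFoldUpd_prefix m c c
    have hinv1 := pvFoldUpd_inv m allowed hv c c h1 h2
    have hsat : ∀ x ∈ c, ∀ y ∈ m.getD x [], y ∈ c1 := fun x hx => pvFoldUpd_sat m c c x hx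
    by_cases hlen : c1.length = c.length
    · have hceq : c1 = c := (hpre.eq_of_length (by omega)).symm
      rw [hceq]
      obtain ⟨fA', rfl⟩ : ∃ fA', fA = fA' + 1 := by
        refine ⟨fA - 1, ?_⟩
        omega
      show (if c.length = c.length then c else _) = _
      rw [if_pos rfl]
      rw [hceq] at hsat
      exact (pvW_sat m c hsat _ _).symm
    · have hlt : c.length < c1.length := by
        have := hpre.length_le
        omega
      rw [ih c.length c1 hinv1.1 hinv1.2 (fun h => hlen h.symm) (by omega)]
      have e1 := pvWC_scanSeg m allowed hv c (c.length - 0) 0 rfl (by omega) c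
        (List.prefix_refl c) h1 h2
      rw [List.drop_zero] at e1
      rw [← hc1] at e1
      have e2 : pvWC m allowed c1 c.length = pvWC m allowed c1 0 := by
        refine (pvWC_noop_seg m allowed c1 hv hinv1.1 hinv1.2 c.length 0 c.length
          (by omega) (by omega) (by omega) ?_).symm
        intro k hk y hy
        have hget : c1.getD k "" = c.getD k "" := by
          obtain ⟨t, ht⟩ := hpre
          rw [← ht]
          exact List.getD_append c t "" k hk
        have hxc : c.getD k "" ∈ c := by
          rw [List.getD_eq_getElem _ _ hk]
          exact List.getElem_mem hk
        rw [hget] at hy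
        exact hsat _ hxc y hy
      rw [e1, e2]

lemma pvW_nodup (m : pvD) : ∀ (f : Nat) (fr : List String) (k : Nat),
    fr.Nodup → (pvW m f fr k).Nodup := by
  intro f
  induction f with
  | zero => intro fr k h; exact h
  | succ f ih =>
    intro fr k h
    show List.Nodup (if k < fr.length then
      pvW m f (PySem.Set.update fr (m.getD (fr.getD k "") [])) (k + 1) else fr)
    by_cases hk : k < fr.length
    · rw [if_pos hk]; exact ih _ _ (PySem.Set.nodup_update _ _ h)
    · rw [if_neg hk]; exact h

lemma pvGetD_nodup (m : pvD) (hm : ∀ v ∈ m.values, v.Nodup) (hop : String) :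
    (m.getD hop []).Nodup := by
  rcases pvGetD_mem_values_or_nil m hop with h | h
  · exact hm _ h
  · rw [h]; exact List.nodup_nil

-- per-key: A's fixpoint flatten = B's memoized worklist (value stored for one hop)
lemma pvKey_eq (m : pvD) (hm : ∀ v ∈ m.values, v.Nodup) (hop : String) :
    pvFlattenGo m (pvFuelA m (m.getD hop [])) 0 (m.getD hop [])
      = (pvBGo m (pvFuelB m (m.getD hop [])) (m.getD hop [])
           (PySem.Set.ofList (m.getD hop [])) 0).2 := by
  have hcnd : (m.getD hop []).Nodup := pvGetD_nodup m hm hop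
  rw [PySem.Set.ofList_eq_self_of_nodup _ hcnd, pvBGo_diag]
  set c := m.getD hop [] with hc
  set allowed := PySem.Set.ofList (c ++ m.values.flatten) with hallowed
  have hv : ∀ v ∈ m.values, ∀ x ∈ v, x ∈ allowed := by
    intro v hvv x hx
    rw [hallowed]
    exact (PySem.Set.mem_ofList _ _).2 (List.mem_append.2 (Or.inr (List.mem_flatten.2 ⟨v, hvv, hx⟩)))
  have hsubc : ∀ x ∈ c, x ∈ allowed := by
    intro x hx
    rw [hallowed]
    exact (PySem.Set.mem_ofList _ _).2 (List.mem_append.2 (Or.inl hx))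
  have hUb : allowed.length ≤ c.length + m.values.flatten.length := by
    rw [hallowed]
    calc (PySem.Set.ofList (c ++ m.values.flatten)).length
        ≤ (c ++ m.values.flatten).length := PySem.Set.length_ofList_le _
      _ = c.length + m.values.flatten.length := List.length_append
  have hgo_nil : ∀ f : Nat, pvFlattenGo m f 0 [] = [] := by
    intro f
    cases f with
    | zero => rfl
    | succ f => exact if_pos rfl
  have hw_nil : ∀ (f k : Nat), pvW m f [] k = [] := by
    intro f k
    cases f with
    | zero => rfl
    | succ f => exact if_neg (by simp)
  by_cases hcnil : c = []
  · rw [hcnil, hgo_nil, hw_nil]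
  · have h0 : (0 : Nat) ≠ c.length := by
      intro h
      exact hcnil (List.length_eq_zero_iff.1 h.symm)
    have hfa : pvFuelA m c = allowed.length + 2 := rfl
    rw [hfa]
    rw [pvFlattenGo_eq_pvWC m allowed hv (allowed.length + 2) 0 c hcnd hsubc h0 (by omega)]
    show pvWC m allowed c 0 = pvW m (pvFuelB m c) c 0
    unfold pvWC
    refine pvW_fuel_eq m allowed hv _ _ c 0 hcnd hsubc (by omega) ?_
    show allowed.length ≤ c.length + m.values.flatten.length + 1 + 0
    omega

-- B's per-key result, in single-list form, stays duplicate-free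
lemma pvKeyB_nodup (m : pvD) (hm : ∀ v ∈ m.values, v.Nodup) (hop : String) :
    ((pvBGo m (pvFuelB m (m.getD hop [])) (m.getD hop [])
        (PySem.Set.ofList (m.getD hop [])) 0).2).Nodup := by
  have hcnd : (m.getD hop []).Nodup := pvGetD_nodup m hm hop
  rw [PySem.Set.ofList_eq_self_of_nodup _ hcnd, pvBGo_diag]
  exact pvW_nodup m _ _ _ hcnd

lemma pvFlattenAux (ks : List String) : ∀ m : pvD, (∀ v ∈ m.values, v.Nodup) →
    ks.foldl (fun m hop =>
      m.insert hop (pvFlattenGo m (pvFuelA m (m.getD hop [])) 0 (m.getD hop []))) m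
    = ks.foldl (fun m hop =>
      m.insert hop (pvBGo m (pvFuelB m (m.getD hop [])) (m.getD hop [])
        (PySem.Set.ofList (m.getD hop [])) 0).2) m := by
  induction ks with
  | nil => intro m _; rfl
  | cons hop ks ih =>
    intro m hm
    rw [List.foldl_cons, List.foldl_cons, pvKey_eq m hm hop]
    apply ih
    intro v hv
    rcases PySem.Dict.mem_values_insert _ _ _ _ hv with h | h
    · rw [h]; exact pvKeyB_nodup m hm hop
    · exact hm _ h

lemma pvFlatten_eq (m : pvD) (hm : ∀ v ∈ m.values, v.Nodup) :
    pvFlatten m = pvBFlatten m := by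
  unfold pvFlatten pvBFlatten
  simp only []
  exact pvFlattenAux m.keys m hm

lemma pvFoldl_preserve {α β : Type} (P : β → Prop) (f : β → α → β)
    (h : ∀ b a, P b → P (f b a)) : ∀ (l : List α) (b : β), P b → P (l.foldl f b) := by
  intro l
  induction l with
  | nil => intro b hb; exact hb
  | cons x l ih => intro b hb; exact ih _ (h b x hb)

def pvVN (d : pvD) : Prop := ∀ v ∈ d.values, v.Nodup

lemma pvVN_addEdge (d : pvD) (k v : String) (h : pvVN d) : pvVN (pvAddEdge d k v) := by
  intro w hw
  rcases PySem.Dict.mem_values_insert _ _ _ _ hw with hw | hw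
  · rw [hw]
    exact PySem.Set.nodup_add _ _ (pvGetD_nodup d h k)
  · exact h _ hw

lemma pvVN_go : ∀ (hops : List String) (acc : pvD × pvD), pvVN acc.1 → pvVN acc.2 →
    pvVN (pvEdgeGo acc hops).1 ∧ pvVN (pvEdgeGo acc hops).2 := by
  intro hops
  induction hops with
  | nil => intro acc h1 h2; exact ⟨h1, h2⟩
  | cons h rest ih =>
    intro acc h1 h2
    show pvVN (pvEdgeGo (_, _) rest).1 ∧ _
    apply ih
    · exact pvFoldl_preserve pvVN _ (fun d x hd => pvVN_addEdge d x h hd) rest acc.1 h1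
    · by_cases hr : rest = []
      · rw [if_pos hr]; exact h2
      · rw [if_neg hr]
        intro w hw
        rcases PySem.Dict.mem_values_insert _ _ _ _ hw with hw | hw
        · rw [hw]
          exact PySem.Set.nodup_update _ _ (pvGetD_nodup acc.2 h2 h)
        · exact h2 _ hw

lemma pvVN_edges (tr : List (String × List (String × List (String × Int)))) :
    pvVN (tr.foldl (fun acc kv =>
        kv.2.foldl (fun acc kv2 => pvEdgesA acc kv2.2) acc)
        ((PySem.Dict.empty : pvD), (PySem.Dict.empty : pvD))).1 ∧
    pvVN (tr.foldl (fun acc kv =>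
        kv.2.foldl (fun acc kv2 => pvEdgesA acc kv2.2) acc)
        ((PySem.Dict.empty : pvD), (PySem.Dict.empty : pvD))).2 := by
  have hstart : pvVN ((PySem.Dict.empty : pvD)) := by
    intro v hv
    cases hv
  refine pvFoldl_preserve (fun acc : pvD × pvD => pvVN acc.1 ∧ pvVN acc.2) _ ?_ tr _ ⟨hstart, hstart⟩
  intro acc kv hacc
  refine pvFoldl_preserve (fun acc : pvD × pvD => pvVN acc.1 ∧ pvVN acc.2) _ ?_ kv.2 acc hacc
  intro acc kv2 hacc
  rw [pvEdgesA_eq_go]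
  exact pvVN_go _ acc hacc.1 hacc.2

lemma pvMain (tr : List (String × List (String × List (String × Int)))) :
    compute_pred_succ_constraints tr = compute_pred_succ_constraints_alt tr := by
  unfold compute_pred_succ_constraints compute_pred_succ_constraints_alt
  simp only [pvEdgesA_eq_pvEdgesB] at *
  have hvn := pvVN_edges tr
  rw [pvEdgesA_eq_pvEdgesB] at hvn
  rw [pvFlatten_eq _ hvn.1, pvFlatten_eq _ hvn.2]

-- ===== VERDICT (by name: the statement is the Claim_ definition above) =====
theorem compute_pred_succ_constraints_spec : Claim_equal_compute_pred_succ_constraints := by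
  intro tr _ _
  unfold Spec_compute_pred_succ_constraints
  exact pvMain tr
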